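-- pv_equiv track=rewrite | github.com/CVC-Lab/SAC-for-H-Bond-Learning | mol_processors/missing_residues.py | below_max_missing_res
-- ===== SOURCE A (Python) =====
-- def below_max_missing_res (seq, threshold=100):
--     for chain in seq:
--         num_consec = 0
--         for char in seq[chain]:
--             if char == "-":
--                 num_consec += 1
--                 if num_consec > threshold:
--                     print ("Chain ", chain, "had ", num_consec, "consecutive missing residues")
--                     return False
--             else:
--                 num_consec = 0
--     return True
-- ===== SOURCE B (Python) =====
-- def below_max_missing_res(seq, threshold=100):
--     need = max(threshold, 0) + 1
--     for chain in seq: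
--         s = seq[chain]
--         if need <= len(s) and "-" * need in s:
--             print ("Chain ", chain, "had ", need, "consecutive missing residues")
--             return False
--     return True
-- ===== Notes on version B (the rewrite author's own statement) =====
-- stated objective: idiomatic
-- what changed: Replaces the per-character consecutive-dash counter with a single substring test per chain: build the needle '-'*(max(threshold,0)+1) once and use Python's native 'needle in s'.
import Mathlib
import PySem

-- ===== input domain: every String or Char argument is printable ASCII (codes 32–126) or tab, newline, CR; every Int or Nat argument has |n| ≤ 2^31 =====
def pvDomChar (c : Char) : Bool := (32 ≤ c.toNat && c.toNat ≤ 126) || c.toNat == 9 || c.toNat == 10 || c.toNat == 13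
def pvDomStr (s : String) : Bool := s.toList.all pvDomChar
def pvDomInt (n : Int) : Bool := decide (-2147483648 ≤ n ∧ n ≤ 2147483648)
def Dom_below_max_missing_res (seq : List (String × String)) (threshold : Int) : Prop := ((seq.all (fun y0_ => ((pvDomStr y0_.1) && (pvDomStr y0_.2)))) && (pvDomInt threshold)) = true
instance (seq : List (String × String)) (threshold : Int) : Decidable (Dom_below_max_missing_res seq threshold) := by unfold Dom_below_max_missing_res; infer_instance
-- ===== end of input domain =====

-- B replaces A's per-character consecutive-dash counter by one substring test per chain
-- (needle '-'*(max(threshold,0)+1)); equivalence is about the return value (prints are dropped).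

-- ===== PORT A =====
-- inner 'for char in seq[chain]' loop: counter of consecutive '-', early False on counter > threshold
def pvInnerA : List Char → Int → Int → Bool
  | [], _, _ => true
  | c :: cs, numConsec, threshold =>
    if c = '-' then
      if numConsec + 1 > threshold then false
      else pvInnerA cs (numConsec + 1) threshold
    else pvInnerA cs 0 threshold

-- outer 'for chain in seq' loop over the dict's keys
def pvOuterA (d : PySem.Dict String String) (threshold : Int) : List String → Bool
  | [] => true
  | k :: ks =>
    if pvInnerA (PySem.Dict.getD d k "").toList 0 threshold then pvOuterA d threshold ks
    else false

def below_max_missing_res (seq : List (String × String)) (threshold : Int) : Bool :=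
  let d := PySem.Dict.ofList seq
  pvOuterA d threshold (PySem.Dict.keys d)

-- ===== PORT B =====
-- outer loop of Source B: length guard, then one '"-" * need in seq[chain]' test per chain
-- ('"-" * need' ported exactly as a replicate of '-')
def pvOuterB (d : PySem.Dict String String) (need : Nat) : List String → Bool
  | [] => true
  | k :: ks =>
    let s := PySem.Dict.getD d k ""
    if decide ((need : Int) ≤ PySem.Str.len s) &&
        PySem.Str.isIn (String.ofList (List.replicate need '-')) s then false
    else pvOuterB d need ks

def below_max_missing_res_alt (seq : List (String × String)) (threshold : Int) : Bool :=
  let need := (max threshold 0 + 1).toNat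
  let d := PySem.Dict.ofList seq
  pvOuterB d need (PySem.Dict.keys d)

-- ===== PRECONDITION & SPEC =====
def Spec_below_max_missing_res (seq : List (String × String)) (threshold : Int) (out : Bool) : Prop := out = below_max_missing_res_alt seq threshold
instance (seq : List (String × String)) (threshold : Int) (out : Bool) : Decidable (Spec_below_max_missing_res seq threshold out) := by unfold Spec_below_max_missing_res; infer_instance

-- ===== CLAIM (what is proved, stated in full; the proofs are below) =====
def Claim_equal_below_max_missing_res : Prop := ∀ (seq : List (String × String)) (threshold : Int), Dom_below_max_missing_res seq threshold → Spec_below_max_missing_res seq threshold (below_max_missing_res seq threshold)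

-- ===== LEMMAS AND PROOFS =====

-- a run of K copies of a cannot cross an element c ≠ a
theorem rep_infix_split {a c : Char} (hc : c ≠ a) {K : Nat} (l1 l2 : List Char) :
    List.replicate K a <:+: (l1 ++ c :: l2) ↔
      List.replicate K a <:+: l1 ∨ List.replicate K a <:+: l2 := by
  constructor
  · intro h
    obtain ⟨j, hpre⟩ := (PySem.Chars.exists_prefix_drop_iff_isIn _ _).2
      ((PySem.Chars.isIn_iff_infix _ _).2 h)
    by_cases hj : j ≤ l1.length
    · rw [List.drop_append_of_le_length hj] at hpre
      by_cases hK : K ≤ (l1.drop j).length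
      · left
        refine ((PySem.Chars.isIn_iff_infix _ _).1 ?_)
        refine (PySem.Chars.exists_prefix_drop_iff_isIn _ _).1 ⟨j, ?_⟩
        obtain ⟨t, ht⟩ := hpre
        refine ⟨(l1.drop j).drop K, ?_⟩
        have hlen : (List.replicate K a).length = K := List.length_replicate
        have : l1.drop j = (l1.drop j ++ c :: l2).take (l1.drop j).length := by
          simp
        -- replicate K a is the first K elements, K ≤ (l1.drop j).length
        have h1 : (l1.drop j ++ c :: l2).take K = List.replicate K a := by
          rw [← ht]; simp [hlen]
        rw [List.take_append_of_le_length hK] at h1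
        rw [← h1]; simp
      · exfalso
        replace hK : (l1.drop j).length < K := Nat.lt_of_not_le hK
        obtain ⟨t, ht⟩ := hpre
        have h1 : (l1.drop j ++ c :: l2)[(l1.drop j).length]? = some c := by
          simp
        rw [← ht] at h1
        have h2 : (List.replicate K a ++ t)[(l1.drop j).length]? = some a := by
          rw [List.getElem?_append_left (by simpa using hK)]
          rw [List.getElem?_replicate, if_pos hK]
        rw [h1] at h2
        exact hc (Option.some.inj h2)
    · right
      replace hj : l1.length < j := Nat.lt_of_not_le hj
      have : List.drop j (l1 ++ c :: l2) = List.drop (j - l1.length - 1) l2 := by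
        rw [List.drop_append]
        have h1 : List.drop j l1 = [] := List.drop_eq_nil_of_le (by omega)
        have h2 : j - l1.length = (j - l1.length - 1) + 1 := by omega
        rw [h1, List.nil_append, h2, List.drop_succ_cons]
        congr 1
      rw [this] at hpre
      exact ((PySem.Chars.isIn_iff_infix _ _).1
        ((PySem.Chars.exists_prefix_drop_iff_isIn _ _).1 ⟨_, hpre⟩))
  · rintro (h | h)
    · exact h.trans ⟨[], c :: l2, by simp⟩
    · exact h.trans ⟨l1 ++ [c], [], by simp⟩

-- characterisation of A's inner loop: it returns false iff a run of (max threshold 0)+1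
-- dashes occurs in (n dashes already seen) ++ remaining characters
theorem innerA_iff (t : Int) (cs : List Char) (n : Nat) (hn : (n : Int) ≤ max t 0) :
    pvInnerA cs (n : Int) t = false ↔
      List.replicate ((max t 0).toNat + 1) '-' <:+: (List.replicate n '-' ++ cs) := by
  induction cs generalizing n with
  | nil =>
    simp only [pvInnerA]
    constructor
    · intro h; simp at h
    · intro h
      have := h.length_le
      simp at this
      omega
  | cons c cs ih =>
    have hrep : List.replicate n '-' ++ c :: cs = List.replicate n '-' ++ [c] ++ cs := by simp
    by_cases hc : c = '-'
    · subst hc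
      have heq : List.replicate n '-' ++ '-' :: cs = List.replicate (n + 1) '-' ++ cs := by
        rw [List.replicate_succ']; simp
      rw [heq]
      simp only [pvInnerA]
      by_cases hgt : (n : Int) + 1 > t
      · rw [if_pos hgt]
        have hM : n = (max t 0).toNat := by omega
        constructor
        · intro _
          refine List.IsPrefix.isInfix ?_
          refine ⟨cs, ?_⟩
          rw [hM]
        · intro _; rfl
      · rw [if_neg hgt]
        have : ((n : Int) + 1) = ((n + 1 : Nat) : Int) := by push_cast; ring
        rw [this]
        exact ih (n + 1) (by omega)
    · simp only [pvInnerA, if_neg hc]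
      have h0 := ih 0 (by omega)
      simp only [List.replicate_zero, List.nil_append, Nat.cast_zero] at h0
      rw [h0, rep_infix_split (fun h => hc h)]
      constructor
      · intro h; exact Or.inr h
      · rintro (h | h)
        · exact absurd (by simpa using h.length_le) (by omega)
        · exact h

-- per-chain: A's counter loop fails iff B's needle occurs in the string
theorem inner_eq_isIn (t : Int) (s : String) :
    pvInnerA s.toList 0 t =
      !(PySem.Str.isIn (String.ofList (List.replicate (max t 0 + 1).toNat '-')) s) := by
  have hK : (max t 0 + 1).toNat = (max t 0).toNat + 1 := by omega
  have h := innerA_iff t s.toList 0 (by simp)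
  simp only [List.replicate_zero, List.nil_append, Nat.cast_zero] at h
  rcases hb : PySem.Str.isIn (String.ofList (List.replicate (max t 0 + 1).toNat '-')) s with _ | _
  · simp only [Bool.not_false]
    by_contra hne
    have : pvInnerA s.toList 0 t = false := by
      cases hx : pvInnerA s.toList 0 t
      · rfl
      · exact absurd hx hne
    have hin := h.1 this
    have : PySem.Str.isIn (String.ofList (List.replicate (max t 0 + 1).toNat '-')) s = true := by
      rw [PySem.Str.isIn_iff_infix, String.toList_ofList]
      simpa [hK] using hin
    rw [hb] at this; exact Bool.false_ne_true this
  · simp only [Bool.not_true]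
    apply h.2
    have := (PySem.Str.isIn_iff_infix _ _).1 hb
    rw [String.toList_ofList] at this
    simpa [hK] using this

-- the length guard of Source B does not change the test's value: a needle longer than the
-- string is never an infix of it
theorem guard_drop (need : Nat) (s : String) :
    (decide ((need : Int) ≤ PySem.Str.len s) &&
        PySem.Str.isIn (String.ofList (List.replicate need '-')) s) =
      PySem.Str.isIn (String.ofList (List.replicate need '-')) s := by
  rcases hb : PySem.Str.isIn (String.ofList (List.replicate need '-')) s with _ | _
  · simp
  · have h := (PySem.Str.isIn_iff_infix _ _).1 hb
    rw [String.toList_ofList] at h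
    have hlen : need ≤ s.length := by simpa using h.length_le
    simp [PySem.Str.len_eq, PySem.Chars.len]
    omega

theorem outer_eq (d : PySem.Dict String String) (t : Int) (ks : List String) :
    pvOuterA d t ks = pvOuterB d (max t 0 + 1).toNat ks := by
  induction ks with
  | nil => rfl
  | cons k ks ih =>
    simp only [pvOuterA, pvOuterB, guard_drop, inner_eq_isIn t (PySem.Dict.getD d k "")]
    cases PySem.Str.isIn (String.ofList (List.replicate (max t 0 + 1).toNat '-'))
        (PySem.Dict.getD d k "") <;> simp [ih]

-- ===== VERDICT (by name: the statement is the Claim_ definition above) =====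
theorem below_max_missing_res_spec : Claim_equal_below_max_missing_res := by
  intro seq threshold _
  unfold Spec_below_max_missing_res below_max_missing_res below_max_missing_res_alt
  exact outer_eq _ threshold _
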